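-- pv_equiv track=rewrite | github.com/Baku101/Badania-Operacyjne | calosc.py | znajdx_najmniejsze_kolumny
-- ===== SOURCE A (Python) =====
-- def znajdx_najmniejsze_kolumny(macierz: list[list[int]]) -> list[int]:
--     """
--     Funkcja znajdująca najmniejszy element w każdej z kolumn macierzy.
--
--     :param macierz: Macierz w kolumnach której mają być znalezione najmniejsze elementy.
--     :return: Lista najmniejszych elementów w kolumnach macierzy.
--     """
--     najmniejsze_elementy = []
--     for i in range(len(macierz[0])):
--         najmniejszy_element = macierz[0][i]
--         for j in range(1, len(macierz)):
--             if najmniejszy_element > macierz[j][i]: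
--                 najmniejszy_element = macierz[j][i]
--         najmniejsze_elementy.append(najmniejszy_element)
--     return najmniejsze_elementy
-- ===== SOURCE B (Python) =====
-- def znajdx_najmniejsze_kolumny(macierz: list[list[int]]) -> list[int]:
--     """Single row-wise pass: start from the first row and fold each later row
--     into a vector of running column minima (elementwise min), instead of
--     scanning each column separately."""
--     akumulator = list(macierz[0])
--     for wiersz in macierz[1:]:
--         akumulator = [m if m < x else x for m, x in zip(akumulator, wiersz)]
--     return akumulator
-- ===== Notes on version B (the rewrite author's own statement) =====
-- stated objective: alternative
-- what changed: Replaces A's column-by-column scan (outer loop over column indices, inner indexed loop over rows keeping a scalar running minimum) by a single row-wise fold: the first row is the accumulator vector and each later row is merged elementwise, so no index arithmetic and a different traversal order.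
import Mathlib
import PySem

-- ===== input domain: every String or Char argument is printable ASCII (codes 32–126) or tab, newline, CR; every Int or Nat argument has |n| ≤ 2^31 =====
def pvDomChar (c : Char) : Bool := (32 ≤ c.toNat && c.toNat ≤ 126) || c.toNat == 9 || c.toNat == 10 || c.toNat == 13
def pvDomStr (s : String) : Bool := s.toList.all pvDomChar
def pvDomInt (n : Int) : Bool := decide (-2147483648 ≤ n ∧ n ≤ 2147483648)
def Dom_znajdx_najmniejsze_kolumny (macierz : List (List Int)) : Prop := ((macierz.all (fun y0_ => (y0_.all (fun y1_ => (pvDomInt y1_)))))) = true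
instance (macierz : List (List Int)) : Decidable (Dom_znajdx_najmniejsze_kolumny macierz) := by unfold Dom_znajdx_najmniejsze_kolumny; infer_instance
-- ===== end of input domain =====

-- B replaces A's column-by-column scan by a single row-wise fold of elementwise minima (alternative decomposition; same cost).


-- ===== PORT A =====
-- Literal port of A. Indexing is via PySem.List.pyGetD, which is exact under
-- Pre_ (every index the loops reach is then in range; outside Pre_ Python raises).
def znajdx_najmniejsze_kolumny (macierz : List (List Int)) : List Int :=
  let row0 := PySem.List.pyGetD macierz 0 []
  (PySem.List.pyRange 0 (row0.length : Int) 1).foldl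
    (fun najmniejsze_elementy i =>
      let start := PySem.List.pyGetD row0 i 0
      let najmniejszy_element :=
        (PySem.List.pyRange 1 (macierz.length : Int) 1).foldl
          (fun nm j =>
            let v := PySem.List.pyGetD (PySem.List.pyGetD macierz j []) i 0
            if nm > v then v else nm) start
      najmniejsze_elementy ++ [najmniejszy_element]) []

-- ===== PORT B =====
-- Port of Source B: akumulator starts as macierz[0] (pyGetD; the empty matrix is
-- outside Pre_, where Python raises), macierz[1:] is drop 1, and the
-- comprehension over zip(akumulator, wiersz) is map over List.zip (exact:
-- zip truncates to the shorter list in both languages).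
def znajdx_najmniejsze_kolumny_alt (macierz : List (List Int)) : List Int :=
  (macierz.drop 1).foldl
    (fun akumulator wiersz =>
      (akumulator.zip wiersz).map (fun p => if p.1 < p.2 then p.1 else p.2))
    (PySem.List.pyGetD macierz 0 [])

-- ===== PRECONDITION & SPEC =====
-- Pre_ excludes exactly the inputs on which A raises IndexError: the empty matrix
-- (macierz[0]) and matrices where some later row is shorter than the first row.
def Pre_znajdx_najmniejsze_kolumny (macierz : List (List Int)) : Prop :=
  macierz ≠ [] ∧ ∀ row ∈ macierz.tail, (macierz.headD []).length ≤ row.length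
instance (macierz : List (List Int)) : Decidable (Pre_znajdx_najmniejsze_kolumny macierz) := by
  unfold Pre_znajdx_najmniejsze_kolumny; infer_instance

def pvWitness_znajdx_najmniejsze_kolumny : List (List Int) := [[3, 1], [2, 5], [0, 7]]

def Spec_znajdx_najmniejsze_kolumny (macierz : List (List Int)) (out : List Int) : Prop := out = znajdx_najmniejsze_kolumny_alt macierz
instance (macierz : List (List Int)) (out : List Int) : Decidable (Spec_znajdx_najmniejsze_kolumny macierz out) := by unfold Spec_znajdx_najmniejsze_kolumny; infer_instance

-- ===== CLAIM (what is proved, stated in full; the proofs are below) =====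
def Claim_equal_znajdx_najmniejsze_kolumny : Prop := ∀ (macierz : List (List Int)), Dom_znajdx_najmniejsze_kolumny macierz → Pre_znajdx_najmniejsze_kolumny macierz → Spec_znajdx_najmniejsze_kolumny macierz (znajdx_najmniejsze_kolumny macierz)

-- ===== LEMMAS AND PROOFS =====

-- Mapping getD over the index range reproduces the list.
theorem map_getD_range (l : List Int) :
    (List.range l.length).map (fun k => l.getD k 0) = l := by
  apply List.ext_getElem
  · simp
  · intro i h1 h2
    simp [List.getD_eq_getElem?_getD, List.getElem?_eq_getElem h2]

-- One elementwise-min step, read off at index k (k < acc.length ≤ row.length).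
theorem zipmin_getD (acc row : List Int) (k : Nat)
    (hk : k < acc.length) (hlen : acc.length ≤ row.length) :
    ((acc.zip row).map (fun p => if p.1 < p.2 then p.1 else p.2)).getD k 0
      = min (acc.getD k 0) (row.getD k 0) := by
  have hk2 : k < row.length := lt_of_lt_of_le hk hlen
  have hkz : k < (acc.zip row).length := by rw [List.length_zip]; omega
  rw [List.getD_eq_getElem?_getD, List.getElem?_map, List.getElem?_eq_getElem hkz,
      List.getD_eq_getElem?_getD, List.getD_eq_getElem?_getD,
      List.getElem?_eq_getElem hk, List.getElem?_eq_getElem hk2]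
  simp [List.getElem_zip, min_def]
  split_ifs <;> omega

-- B's row-wise fold, characterised column-by-column.
theorem rowfold_eq (rs : List (List Int)) (acc : List Int)
    (h : ∀ row ∈ rs, acc.length ≤ row.length) :
    rs.foldl (fun a row => (a.zip row).map (fun p => if p.1 < p.2 then p.1 else p.2)) acc
      = (List.range acc.length).map
          (fun k => (rs.map (fun row => row.getD k 0)).foldl min (acc.getD k 0)) := by
  induction rs generalizing acc with
  | nil => exact (map_getD_range acc).symm
  | cons r rs ih =>
      have hr : acc.length ≤ r.length := h r (List.mem_cons_self ..)
      have hstep : ((acc.zip r).map (fun p => if p.1 < p.2 then p.1 else p.2)).length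
          = acc.length := by simp [List.length_zip]; omega
      simp only [List.foldl_cons]
      rw [ih _ (fun row hm => by rw [hstep]; exact h row (List.mem_cons_of_mem _ hm))]
      rw [hstep]
      apply List.map_congr_left
      intro k hk
      rw [zipmin_getD acc r k (List.mem_range.mp hk) hr]
      simp [List.foldl_cons]

-- A's inner running-minimum loop is the fold of `min` over the mapped column.
theorem inner_min (rs : List (List Int)) (g : List Int → Int) (s : Int) :
    rs.foldl (fun nm row => if nm > g row then g row else nm) s
      = (rs.map g).foldl min s := by
  rw [List.foldl_map]
  apply PySem.List.foldl_congr_mem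
  intro b x _
  simp only [min_def]
  split_ifs <;> omega

-- ===== VERDICT (by name: the statement is the Claim_ definition above) =====
theorem znajdx_najmniejsze_kolumny_spec : Claim_equal_znajdx_najmniejsze_kolumny := by
  intro macierz _ hpre
  unfold Spec_znajdx_najmniejsze_kolumny
  match macierz, hpre with
  | r :: rs, ⟨_, hpre⟩ =>
    simp only [List.tail_cons, List.headD_cons] at hpre
    unfold znajdx_najmniejsze_kolumny znajdx_najmniejsze_kolumny_alt
    simp only [PySem.List.pyGetD_zero_cons, List.drop_succ_cons, List.drop_zero]
    rw [rowfold_eq rs r hpre]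
    rw [PySem.List.foldl_append_singleton_eq_map, PySem.List.pyRange_zero_nat]
    rw [List.map_map]
    simp only [List.nil_append]
    apply List.map_congr_left
    intro k hk
    have hk' : k < r.length := List.mem_range.mp hk
    simp only [Function.comp]
    rw [PySem.List.foldl_pyRange_pyGetD' (r :: rs) ([] : List Int)
          (fun nm row => if nm > PySem.List.pyGetD row (k : Int) 0
                         then PySem.List.pyGetD row (k : Int) 0 else nm)
          (PySem.List.pyGetD r (k : Int) 0) (by omega)]
    simp only [Int.toNat_one, List.drop_succ_cons, List.drop_zero]
    rw [inner_min]
    simp only [PySem.List.pyGetD_natCast]
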